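-- pv_equiv track=rewrite | github.com/robj137/advent_of_code | 2018/day20.bad.py | split_out_paths
-- ===== SOURCE A (Python) =====
-- def find_matching_parenthesis(dirs, i):
--   # dirs[i] should be a '(', and so we want to find its partner / closer
--   n_pars = 1
--   while n_pars > 0:
--     i += 1
--     if dirs[i] == '(':
--       n_pars += 1
--     if dirs[i] == ')':
--       n_pars -= 1
--   return i
--
-- def split_out_paths(dirs, i):
--   # want to return a list of pointers, e.g. each pointer: [start, end, jumpto]
--   grouping_close = find_matching_parenthesis(dirs, i)
--   orig = ptr = i+1
--   i += 1
--   branch_points = []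
--   while i < grouping_close:
--     if dirs[i] == '|':
--       branch_points.append(i)
--     if dirs[i] == '(':
--       close = find_matching_parenthesis(dirs, i)
--       i = close
--     i += 1
--   paths = []
--   for point in branch_points:
--     paths.append([ptr, point, grouping_close+1])
--     ptr = point + 1
--   paths.append([ptr, grouping_close, grouping_close+1])
--   return paths
-- ===== SOURCE B (Python) =====
-- def split_out_paths(dirs, i):
--   # one forward scan with a depth counter instead of repeated
--   # find_matching_parenthesis sub-scans
--   depth = 1
--   branch_points = []
--   j = i
--   while True:
--     j += 1
--     c = dirs[j]
--     if c == '(':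
--       depth += 1
--     elif c == ')':
--       depth -= 1
--       if depth == 0:
--         break
--     elif c == '|' and depth == 1:
--       branch_points.append(j)
--   grouping_close = j
--   starts = [i + 1] + [p + 1 for p in branch_points]
--   ends = branch_points + [grouping_close]
--   return [[s, e, grouping_close + 1] for s, e in zip(starts, ends)]
-- ===== Notes on version B (the rewrite author's own statement) =====
-- stated objective: alternative
-- what changed: A finds the group's closing parenthesis and skips each nested group with separate find_matching_parenthesis sub-scans, then builds the output with a running pointer; B makes one forward scan maintaining a depth counter (recording '|' positions at depth 1, stopping at depth 0) and builds the output by zipping segment starts with segment ends.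
import Mathlib
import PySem

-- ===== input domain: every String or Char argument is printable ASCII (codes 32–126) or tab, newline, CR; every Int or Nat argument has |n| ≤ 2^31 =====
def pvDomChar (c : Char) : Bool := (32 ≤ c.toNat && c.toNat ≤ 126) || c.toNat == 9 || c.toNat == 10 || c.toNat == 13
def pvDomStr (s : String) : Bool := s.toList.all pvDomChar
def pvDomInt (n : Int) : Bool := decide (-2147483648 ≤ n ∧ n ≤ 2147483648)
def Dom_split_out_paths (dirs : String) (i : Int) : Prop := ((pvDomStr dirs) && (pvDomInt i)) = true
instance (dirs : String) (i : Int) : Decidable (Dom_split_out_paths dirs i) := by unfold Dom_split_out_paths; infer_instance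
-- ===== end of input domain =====

-- B replaces A's repeated find_matching_parenthesis sub-scans by one depth-tracked forward scan (objective: alternative decomposition).

-- ===== PORT A =====
-- used by the ports' termination proofs: a successful read is at an index below the length
theorem pvGet_lt {α : Type} (l : List α) (t : Int) (c : α)
    (h : PySem.List.pyGet? l t = some c) : t < (l.length : Int) := by
  by_contra hn
  rw [(PySem.List.pyGet?_eq_none_iff l t).2 (by simp [PySem.Raise.InRange]; omega)] at h
  simp at h

-- measure lemmas used only by the ports' decreasing_by proofs
theorem pvMeasGet {α : Type} (l : List α) (j : Int) (c : α)
    (h : PySem.List.pyGet? l (j + 1) = some c) :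
    ((l.length : Int) - (j + 1)).toNat < ((l.length : Int) - j).toNat := by
  have := pvGet_lt l (j + 1) c h; omega

theorem pvMeasStep (g i : Int) (hlt : i < g) : (g - (i + 1)).toNat < (g - i).toNat := by omega

-- find_matching_parenthesis(dirs, i) with n_pars as a parameter; none = IndexError
def pvFmp (dirs : List Char) (i : Int) (npars : Int) : Option Int :=
  match h : PySem.List.pyGet? dirs (i + 1) with
  | none => none
  | some c =>
    let np := if c = '(' then npars + 1 else npars
    let np2 := if c = ')' then np - 1 else np
    if np2 > 0 then pvFmp dirs (i + 1) np2 else some (i + 1)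
termination_by ((dirs.length : Int) - i).toNat
decreasing_by exact pvMeasGet dirs i c h

-- used by pvLoopA's termination proof
theorem pvFmp_gt (dirs : List Char) : ∀ (i npars m : Int),
    pvFmp dirs i npars = some m → i < m := by
  intro i npars m h
  fun_induction pvFmp dirs i npars with
  | case1 => simp at h
  | case2 i npars c hg np np2 hpos ih => have := ih h; omega
  | case3 i npars c hg np np2 hpos => cases h; omega

theorem pvMeasClose (dirs : List Char) (g i close : Int)
    (hm : pvFmp dirs i 1 = some close) (hlt : i < g) :
    (g - (close + 1)).toNat < (g - i).toNat := by
  have := pvFmp_gt dirs i 1 close hm; omega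

-- the while-loop of split_out_paths; none = IndexError (from dirs[i] or the inner call)
def pvLoopA (dirs : List Char) (g : Int) (i : Int) (bps : List Int) : Option (List Int) :=
  if hlt : i < g then
    match PySem.List.pyGet? dirs i with
    | none => none
    | some c =>
      let bps' := if c = '|' then bps ++ [i] else bps
      if c = '(' then
        match hm : pvFmp dirs i 1 with
        | none => none
        | some close => pvLoopA dirs g (close + 1) bps'
      else pvLoopA dirs g (i + 1) bps'
  else some bps
termination_by (g - i).toNat
decreasing_by
  · exact pvMeasClose dirs g i close hm hlt
  · exact pvMeasStep g i hlt

def pvBuildA (ptr : Int) (bps : List Int) (g : Int) : List (List Int) :=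
  match bps with
  | [] => [[ptr, g, g + 1]]
  | p :: rest => [ptr, p, g + 1] :: pvBuildA (p + 1) rest g

def split_out_paths (dirs : String) (i : Int) : List (List Int) :=
  match pvFmp dirs.toList i 1 with
  | none => []
  | some g =>
    match pvLoopA dirs.toList g (i + 1) [] with
    | none => []
    | some bps => pvBuildA (i + 1) bps g

-- ===== PORT B =====
-- B's single scan: depth counter, branch points collected at depth 1; none = IndexError
def pvScanB (dirs : List Char) (j : Int) (depth : Int) (bps : List Int) : Option (Int × List Int) :=
  match h : PySem.List.pyGet? dirs (j + 1) with
  | none => none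
  | some c =>
    if c = '(' then pvScanB dirs (j + 1) (depth + 1) bps
    else if c = ')' then
      if depth - 1 = 0 then some (j + 1, bps)
      else pvScanB dirs (j + 1) (depth - 1) bps
    else if c = '|' ∧ depth = 1 then pvScanB dirs (j + 1) depth (bps ++ [j + 1])
    else pvScanB dirs (j + 1) depth bps
termination_by ((dirs.length : Int) - j).toNat
decreasing_by
  all_goals exact pvMeasGet dirs j c h

def split_out_paths_alt (dirs : String) (i : Int) : List (List Int) :=
  match pvScanB dirs.toList i 1 [] with
  | none => []
  | some (g, bps) =>
    let starts := (i + 1) :: bps.map (fun p => p + 1)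
    let ends := bps ++ [g]
    (starts.zip ends).map (fun se => [se.1, se.2, g + 1])

-- ===== PRECONDITION & SPEC =====
-- signed parenthesis count of dirs[a:b] (Python indexing, so negative indices wrap)
def pvBal (l : List Char) (a b : Int) : Int :=
  ((PySem.List.pyRange a b 1).map (fun k =>
      match PySem.List.pyGet? l k with
      | some '(' => (1 : Int)
      | some ')' => -1
      | _ => 0)).sum

-- Pre_ = exactly the inputs where Python A returns (no IndexError): the scan that starts at
-- index i+1 begins in range and reaches parenthesis balance 0 before running off the end.
def Pre_split_out_paths (dirs : String) (i : Int) : Prop :=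
  -(dirs.toList.length : Int) ≤ i + 1 ∧
  ∃ j ∈ PySem.List.pyRange (i + 1) (dirs.toList.length : Int) 1,
    1 + pvBal dirs.toList (i + 1) (j + 1) ≤ 0
instance (dirs : String) (i : Int) : Decidable (Pre_split_out_paths dirs i) := by
  unfold Pre_split_out_paths; infer_instance

def pvWitness_split_out_paths : String × Int := ("(a|b)", 0)

def Spec_split_out_paths (dirs : String) (i : Int) (out : List (List Int)) : Prop :=
  out = split_out_paths_alt dirs i
instance (dirs : String) (i : Int) (out : List (List Int)) : Decidable (Spec_split_out_paths dirs i out) := by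
  unfold Spec_split_out_paths; infer_instance

-- ===== CLAIM (what is proved, stated in full; the proofs are below) =====
def Claim_equal_split_out_paths : Prop := ∀ (dirs : String) (i : Int),
  Dom_split_out_paths dirs i → Pre_split_out_paths dirs i →
  Spec_split_out_paths dirs i (split_out_paths dirs i)

-- ===== LEMMAS AND PROOFS =====

theorem pvFmp_none (dirs : List Char) (j np : Int)
    (hg : PySem.List.pyGet? dirs (j + 1) = none) : pvFmp dirs j np = none := by
  rw [pvFmp.eq_def]; split <;> simp_all

theorem pvFmp_some (dirs : List Char) (j np : Int) (c : Char)
    (hg : PySem.List.pyGet? dirs (j + 1) = some c) :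
    pvFmp dirs j np =
      (let np' := if c = '(' then np + 1 else np
       let np2 := if c = ')' then np' - 1 else np'
       if np2 > 0 then pvFmp dirs (j + 1) np2 else some (j + 1)) := by
  rw [pvFmp.eq_def]; split <;> simp_all

theorem pvScanB_none (dirs : List Char) (j d : Int) (bps : List Int)
    (hg : PySem.List.pyGet? dirs (j + 1) = none) : pvScanB dirs j d bps = none := by
  rw [pvScanB.eq_def]; split <;> simp_all

theorem pvScanB_some (dirs : List Char) (j d : Int) (bps : List Int) (c : Char)
    (hg : PySem.List.pyGet? dirs (j + 1) = some c) :
    pvScanB dirs j d bps =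
      (if c = '(' then pvScanB dirs (j + 1) (d + 1) bps
       else if c = ')' then
         if d - 1 = 0 then some (j + 1, bps)
         else pvScanB dirs (j + 1) (d - 1) bps
       else if c = '|' ∧ d = 1 then pvScanB dirs (j + 1) d (bps ++ [j + 1])
       else pvScanB dirs (j + 1) d bps) := by
  rw [pvScanB.eq_def]; split <;> simp_all

-- a successful find_matching call returns an in-range index
theorem pvFmp_lt_len (dirs : List Char) : ∀ (i npars m : Int),
    pvFmp dirs i npars = some m → m < (dirs.length : Int) := by
  intro i npars m h
  fun_induction pvFmp dirs i npars with
  | case1 => simp at h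
  | case2 i npars c hg np np2 hpos ih => exact ih h
  | case3 i npars c hg np np2 hpos =>
    cases h; exact pvGet_lt dirs _ _ hg

-- case-specialised unfoldings
theorem pvFmp_open (dirs : List Char) (j np : Int)
    (hg : PySem.List.pyGet? dirs (j + 1) = some '(') :
    pvFmp dirs j np = if np + 1 > 0 then pvFmp dirs (j + 1) (np + 1) else some (j + 1) := by
  rw [pvFmp_some dirs j np '(' hg]; simp

theorem pvFmp_close (dirs : List Char) (j np : Int)
    (hg : PySem.List.pyGet? dirs (j + 1) = some ')') :
    pvFmp dirs j np = if np - 1 > 0 then pvFmp dirs (j + 1) (np - 1) else some (j + 1) := by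
  rw [pvFmp_some dirs j np ')' hg]; simp

theorem pvFmp_other (dirs : List Char) (j np : Int) (c : Char)
    (hg : PySem.List.pyGet? dirs (j + 1) = some c) (h1 : c ≠ '(') (h2 : c ≠ ')') :
    pvFmp dirs j np = if np > 0 then pvFmp dirs (j + 1) np else some (j + 1) := by
  rw [pvFmp_some dirs j np c hg]; simp [h1, h2]

theorem pvScanB_open (dirs : List Char) (j d : Int) (bps : List Int)
    (hg : PySem.List.pyGet? dirs (j + 1) = some '(') :
    pvScanB dirs j d bps = pvScanB dirs (j + 1) (d + 1) bps := by
  rw [pvScanB_some dirs j d bps '(' hg]; simp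

theorem pvScanB_close (dirs : List Char) (j d : Int) (bps : List Int)
    (hg : PySem.List.pyGet? dirs (j + 1) = some ')') :
    pvScanB dirs j d bps =
      if d - 1 = 0 then some (j + 1, bps) else pvScanB dirs (j + 1) (d - 1) bps := by
  rw [pvScanB_some dirs j d bps ')' hg]; simp

theorem pvScanB_pipe1 (dirs : List Char) (j : Int) (bps : List Int)
    (hg : PySem.List.pyGet? dirs (j + 1) = some '|') :
    pvScanB dirs j 1 bps = pvScanB dirs (j + 1) 1 (bps ++ [j + 1]) := by
  rw [pvScanB_some dirs j 1 bps '|' hg]; simp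

theorem pvScanB_other (dirs : List Char) (j d : Int) (bps : List Int) (c : Char)
    (hg : PySem.List.pyGet? dirs (j + 1) = some c)
    (h1 : c ≠ '(') (h2 : c ≠ ')') (h3 : ¬(c = '|' ∧ d = 1)) :
    pvScanB dirs j d bps = pvScanB dirs (j + 1) d bps := by
  rw [pvScanB_some dirs j d bps c hg]; simp [h1, h2, h3]

theorem pvLoopA_ge (dirs : List Char) (g i : Int) (bps : List Int) (h : ¬ i < g) :
    pvLoopA dirs g i bps = some bps := by
  rw [pvLoopA.eq_def]; simp [h]

theorem pvLoopA_lt (dirs : List Char) (g i : Int) (bps : List Int) (c : Char)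
    (h : i < g) (hg : PySem.List.pyGet? dirs i = some c) :
    pvLoopA dirs g i bps =
      (let bps' := if c = '|' then bps ++ [i] else bps
       if c = '(' then
         match pvFmp dirs i 1 with
         | none => none
         | some close => pvLoopA dirs g (close + 1) bps'
       else pvLoopA dirs g (i + 1) bps') := by
  rw [pvLoopA.eq_def]
  split
  · simp_all
    by_cases h1 : c = '(' <;> simp only [if_pos, h1, ite_false]
    cases hmm : pvFmp dirs i 1 <;> simp
  · simp_all

-- L0: raising n_pars by one composes two matching-parenthesis searches
theorem pvFmp_succ (dirs : List Char) : ∀ (j d : Int), 1 ≤ d →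
    pvFmp dirs j (d + 1) = (pvFmp dirs j d).bind (fun m => pvFmp dirs m 1) := by
  have H : ∀ (n : Nat) (j d : Int), ((dirs.length : Int) - j).toNat ≤ n → 1 ≤ d →
      pvFmp dirs j (d + 1) = (pvFmp dirs j d).bind (fun m => pvFmp dirs m 1) := by
    intro n
    induction n with
    | zero =>
      intro j d hle hd
      cases hg : PySem.List.pyGet? dirs (j + 1) with
      | none => rw [pvFmp_none dirs j _ hg, pvFmp_none dirs j _ hg]; rfl
      | some c => have := pvGet_lt dirs (j + 1) c hg; omega
    | succ n ih =>
      intro j d hle hd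
      cases hg : PySem.List.pyGet? dirs (j + 1) with
      | none => rw [pvFmp_none dirs j _ hg, pvFmp_none dirs j _ hg]; rfl
      | some c =>
        have hlt := pvGet_lt dirs (j + 1) c hg
        by_cases h1 : c = '('
        · subst h1
          rw [pvFmp_open dirs j _ hg, pvFmp_open dirs j _ hg,
              if_pos (by omega : d + 1 + 1 > 0), if_pos (by omega : d + 1 > 0)]
          exact ih (j + 1) (d + 1) (by omega) (by omega)
        · by_cases h2 : c = ')'
          · subst h2
            rw [pvFmp_close dirs j _ hg, pvFmp_close dirs j _ hg,
                if_pos (by omega : d + 1 - 1 > 0)]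
            by_cases hd1 : d = 1
            · subst hd1; simp
            · rw [if_pos (by omega : d - 1 > 0)]
              have := ih (j + 1) (d - 1) (by omega) (by omega)
              rw [show d - 1 + 1 = d from by omega] at this
              rw [show d + 1 - 1 = d from by omega, this]
          · rw [pvFmp_other dirs j _ c hg h1 h2, pvFmp_other dirs j _ c hg h1 h2,
                if_pos (by omega : d + 1 > 0), if_pos (by omega : d > 0)]
            exact ih (j + 1) d (by omega) hd
  intro j d hd; exact H ((dirs.length : Int) - j).toNat j d (le_refl _) hd

-- L1: B's scan at depth d+1 first descends to depth 1 via a matching-parenthesis search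
theorem pvScanB_deep (dirs : List Char) : ∀ (j d : Int) (bps : List Int), 1 ≤ d →
    pvScanB dirs j (d + 1) bps = (pvFmp dirs j d).bind (fun m => pvScanB dirs m 1 bps) := by
  have H : ∀ (n : Nat) (j d : Int) (bps : List Int), ((dirs.length : Int) - j).toNat ≤ n →
      1 ≤ d → pvScanB dirs j (d + 1) bps = (pvFmp dirs j d).bind (fun m => pvScanB dirs m 1 bps) := by
    intro n
    induction n with
    | zero =>
      intro j d bps hle hd
      cases hg : PySem.List.pyGet? dirs (j + 1) with
      | none => rw [pvScanB_none dirs j _ bps hg, pvFmp_none dirs j _ hg]; rfl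
      | some c => have := pvGet_lt dirs (j + 1) c hg; omega
    | succ n ih =>
      intro j d bps hle hd
      cases hg : PySem.List.pyGet? dirs (j + 1) with
      | none => rw [pvScanB_none dirs j _ bps hg, pvFmp_none dirs j _ hg]; rfl
      | some c =>
        have hlt := pvGet_lt dirs (j + 1) c hg
        by_cases h1 : c = '('
        · subst h1
          rw [pvScanB_open dirs j _ bps hg, pvFmp_open dirs j _ hg,
              if_pos (by omega : d + 1 > 0)]
          exact ih (j + 1) (d + 1) bps (by omega) (by omega)
        · by_cases h2 : c = ')'
          · subst h2
            rw [pvScanB_close dirs j _ bps hg, pvFmp_close dirs j _ hg,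
                if_neg (by omega : ¬ d + 1 - 1 = 0)]
            by_cases hd1 : d = 1
            · subst hd1; simp
            · rw [if_pos (by omega : d - 1 > 0)]
              have := ih (j + 1) (d - 1) bps (by omega) (by omega)
              rw [show d - 1 + 1 = d from by omega] at this
              rw [show d + 1 - 1 = d from by omega, this]
          · rw [pvScanB_other dirs j _ bps c hg h1 h2 (by intro hc; omega),
                pvFmp_other dirs j _ c hg h1 h2, if_pos (by omega : d > 0)]
            exact ih (j + 1) d bps (by omega) hd
  intro j d bps hd; exact H ((dirs.length : Int) - j).toNat j d bps (le_refl _) hd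

-- L2: the main correspondence between A's loop and B's depth-1 scan
theorem pvMain (dirs : List Char) : ∀ (j : Int) (bps : List Int),
    (pvFmp dirs j 1 = none → pvScanB dirs j 1 bps = none) ∧
    (∀ g, pvFmp dirs j 1 = some g →
      ∃ b, pvScanB dirs j 1 bps = some (g, b) ∧ pvLoopA dirs g (j + 1) bps = some b) := by
  have H : ∀ (n : Nat) (j : Int) (bps : List Int), ((dirs.length : Int) - j).toNat ≤ n →
      (pvFmp dirs j 1 = none → pvScanB dirs j 1 bps = none) ∧
      (∀ g, pvFmp dirs j 1 = some g →
        ∃ b, pvScanB dirs j 1 bps = some (g, b) ∧ pvLoopA dirs g (j + 1) bps = some b) := by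
    intro n
    induction n with
    | zero =>
      intro j bps hle
      cases hg : PySem.List.pyGet? dirs (j + 1) with
      | none =>
        refine ⟨fun _ => pvScanB_none dirs j 1 bps hg, fun g h => ?_⟩
        rw [pvFmp_none dirs j 1 hg] at h; simp at h
      | some c => have := pvGet_lt dirs (j + 1) c hg; omega
    | succ n ih =>
      intro j bps hle
      cases hg : PySem.List.pyGet? dirs (j + 1) with
      | none =>
        refine ⟨fun _ => pvScanB_none dirs j 1 bps hg, fun g h => ?_⟩
        rw [pvFmp_none dirs j 1 hg] at h; simp at h
      | some c =>
        have hlt := pvGet_lt dirs (j + 1) c hg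
        by_cases h1 : c = '('
        · subst h1
          have hf2 : pvFmp dirs j 1 = (pvFmp dirs (j + 1) 1).bind (fun m => pvFmp dirs m 1) := by
            rw [pvFmp_open dirs j 1 hg, if_pos (by omega : (1:Int) + 1 > 0)]
            exact pvFmp_succ dirs (j + 1) 1 le_rfl
          have hs2 : pvScanB dirs j 1 bps = (pvFmp dirs (j + 1) 1).bind (fun m => pvScanB dirs m 1 bps) := by
            rw [pvScanB_open dirs j 1 bps hg]
            exact pvScanB_deep dirs (j + 1) 1 bps le_rfl
          cases hm : pvFmp dirs (j + 1) 1 with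
          | none =>
            refine ⟨fun _ => by rw [hs2, hm]; rfl, fun g h => ?_⟩
            rw [hf2, hm] at h; simp at h
          | some m =>
            have hjm := pvFmp_gt dirs (j + 1) 1 m hm
            have hmlen := pvFmp_lt_len dirs (j + 1) 1 m hm
            have ihm := ih m bps (by omega)
            refine ⟨fun h => ?_, fun g h => ?_⟩
            · rw [hf2, hm] at h; simp only [Option.bind_some] at h
              rw [hs2, hm]; simp only [Option.bind_some]
              exact ihm.1 h
            · rw [hf2, hm] at h; simp only [Option.bind_some] at h
              obtain ⟨b, hsb, hlb⟩ := ihm.2 g h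
              have hmg := pvFmp_gt dirs m 1 g h
              refine ⟨b, by rw [hs2, hm]; simpa using hsb, ?_⟩
              rw [pvLoopA_lt dirs g (j + 1) bps '(' (by omega) hg]
              simpa [hm] using hlb
        · by_cases h2 : c = ')'
          · subst h2
            have hf : pvFmp dirs j 1 = some (j + 1) := by
              rw [pvFmp_close dirs j 1 hg]; simp
            have hs : pvScanB dirs j 1 bps = some (j + 1, bps) := by
              rw [pvScanB_close dirs j 1 bps hg]; simp
            refine ⟨fun h => by rw [hf] at h; simp at h, fun g h => ?_⟩
            rw [hf] at h
            obtain rfl : g = j + 1 := by cases h; rfl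
            exact ⟨bps, hs, pvLoopA_ge dirs (j + 1) (j + 1) bps (by omega)⟩
          · by_cases h3 : c = '|'
            · subst h3
              have hf : pvFmp dirs j 1 = pvFmp dirs (j + 1) 1 := by
                rw [pvFmp_other dirs j 1 '|' hg (by decide) (by decide)]; simp
              have hs : pvScanB dirs j 1 bps = pvScanB dirs (j + 1) 1 (bps ++ [j + 1]) :=
                pvScanB_pipe1 dirs j bps hg
              have ihm := ih (j + 1) (bps ++ [j + 1]) (by omega)
              refine ⟨fun h => by rw [hs]; exact ihm.1 (hf ▸ h), fun g h => ?_⟩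
              rw [hf] at h
              obtain ⟨b, hsb, hlb⟩ := ihm.2 g h
              have hjg := pvFmp_gt dirs (j + 1) 1 g h
              refine ⟨b, by rw [hs]; exact hsb, ?_⟩
              rw [pvLoopA_lt dirs g (j + 1) bps '|' (by omega) hg]
              simpa using hlb
            · have hf : pvFmp dirs j 1 = pvFmp dirs (j + 1) 1 := by
                rw [pvFmp_other dirs j 1 c hg h1 h2]; simp
              have hs : pvScanB dirs j 1 bps = pvScanB dirs (j + 1) 1 bps :=
                pvScanB_other dirs j 1 bps c hg h1 h2 (by simp [h3])
              have ihm := ih (j + 1) bps (by omega)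
              refine ⟨fun h => by rw [hs]; exact ihm.1 (hf ▸ h), fun g h => ?_⟩
              rw [hf] at h
              obtain ⟨b, hsb, hlb⟩ := ihm.2 g h
              have hjg := pvFmp_gt dirs (j + 1) 1 g h
              refine ⟨b, by rw [hs]; exact hsb, ?_⟩
              rw [pvLoopA_lt dirs g (j + 1) bps c (by omega) hg]
              simp only [h1, h3, ite_false]
              exact hlb
  intro j bps; exact H ((dirs.length : Int) - j).toNat j bps (le_refl _)

theorem pvBuild_eq : ∀ (bps : List Int) (ptr g : Int),
    pvBuildA ptr bps g =
      ((ptr :: bps.map (fun p => p + 1)).zip (bps ++ [g])).map (fun se => [se.1, se.2, g + 1]) := by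
  intro bps
  induction bps with
  | nil => intro ptr g; rfl
  | cons p rest ih => intro ptr g; simp [pvBuildA, ih]

-- ===== VERDICT (by name: the statement is the Claim_ definition above) =====
theorem split_out_paths_spec : Claim_equal_split_out_paths := by
  intro dirs i _ _
  unfold Spec_split_out_paths split_out_paths split_out_paths_alt
  cases hf : pvFmp dirs.toList i 1 with
  | none => rw [(pvMain dirs.toList i []).1 hf]
  | some g =>
    obtain ⟨b, hs, hl⟩ := (pvMain dirs.toList i []).2 g hf
    rw [hs]
    simp only [hl, pvBuild_eq]
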